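-- pv_equiv track=rewrite | github.com/taranbola/universityAssignments | firstYear/programmingForTheWeb/assignment1/anagrams.py | sub_anagram
-- ===== SOURCE A (Python) =====
-- def sub_anagram(str1,str2):                     #8
--     s2 = list(str2)
--     try:
--         for char in str1:
--             s2.remove(char)
--     except ValueError:
--         return False
--     return True
-- ===== SOURCE B (Python) =====
-- def sub_anagram(str1, str2):
--     c1 = {}
--     for ch in str1:
--         c1[ch] = c1.get(ch, 0) + 1
--     c2 = {}
--     for ch in str2:
--         c2[ch] = c2.get(ch, 0) + 1
--     return all(c2.get(ch, 0) >= n for ch, n in c1.items())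
-- ===== Notes on version B (the rewrite author's own statement) =====
-- stated objective: alternative
-- what changed: Replaces A's destructive remove-one-character-at-a-time loop with try/except early exit by building complete frequency dictionaries of both strings once and comparing the two tables in a single pass.
import Mathlib
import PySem

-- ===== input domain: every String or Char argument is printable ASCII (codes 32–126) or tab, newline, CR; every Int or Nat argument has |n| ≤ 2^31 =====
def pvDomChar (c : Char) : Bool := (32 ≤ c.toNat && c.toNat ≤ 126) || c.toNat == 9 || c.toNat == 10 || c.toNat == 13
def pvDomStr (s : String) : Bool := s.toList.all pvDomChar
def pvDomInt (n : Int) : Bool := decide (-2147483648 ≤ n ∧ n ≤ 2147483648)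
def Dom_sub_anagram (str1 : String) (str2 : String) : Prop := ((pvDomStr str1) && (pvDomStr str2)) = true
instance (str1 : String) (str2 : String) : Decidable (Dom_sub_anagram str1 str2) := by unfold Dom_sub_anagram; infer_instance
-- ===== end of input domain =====

-- B builds complete frequency tables of both strings once and compares them in one pass,
-- replacing A's destructive remove-one-char-at-a-time loop with try/except early exit (objective: alternative).

-- ===== PORT A =====
-- the 'for char in str1: s2.remove(char)' loop; ValueError (remove? = none) returns False
def subAnagramLoop : List Char → List Char → Bool
  | [], _ => true
  | c :: rest, s2 =>
    match PySem.List.remove? s2 c with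
    | none => false
    | some s2' => subAnagramLoop rest s2'

def sub_anagram (str1 : String) (str2 : String) : Bool :=
  subAnagramLoop str1.toList str2.toList

-- ===== PORT B =====
def sub_anagram_alt (str1 : String) (str2 : String) : Bool :=
  -- c1 = {}; for ch in str1: c1[ch] = c1.get(ch, 0) + 1   (and likewise c2 from str2)
  let c1 := str1.toList.foldl (fun d ch => d.insert ch (d.getD ch 0 + 1)) (PySem.Dict.empty : PySem.Dict Char Int)
  let c2 := str2.toList.foldl (fun d ch => d.insert ch (d.getD ch 0 + 1)) (PySem.Dict.empty : PySem.Dict Char Int)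
  -- all(c2.get(ch, 0) >= n for ch, n in c1.items())
  c1.items.all (fun p => decide (c2.getD p.1 0 ≥ p.2))

-- ===== PRECONDITION & SPEC =====
def Spec_sub_anagram (str1 : String) (str2 : String) (out : Bool) : Prop := out = sub_anagram_alt str1 str2
instance (str1 : String) (str2 : String) (out : Bool) : Decidable (Spec_sub_anagram str1 str2 out) := by unfold Spec_sub_anagram; infer_instance

-- ===== CLAIM (what is proved, stated in full; the proofs are below) =====
def Claim_equal_sub_anagram : Prop := ∀ (str1 : String) (str2 : String), Dom_sub_anagram str1 str2 → Spec_sub_anagram str1 str2 (sub_anagram str1 str2)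

-- ===== LEMMAS AND PROOFS =====

-- A's removal loop succeeds iff str1's multiset of characters is contained in str2's
theorem subAnagramLoop_iff (l1 l2 : List Char) :
    subAnagramLoop l1 l2 = true ↔ ∀ c, l1.count c ≤ l2.count c := by
  induction l1 generalizing l2 with
  | nil => simp [subAnagramLoop]
  | cons c rest ih =>
    by_cases hc : c ∈ l2
    · have hl2 : PySem.List.remove? l2 c = some (l2.erase c) := PySem.List.remove?_eq_some_erase l2 c hc
      rw [show subAnagramLoop (c :: rest) l2 = subAnagramLoop rest (l2.erase c) by
        simp [subAnagramLoop, hl2]]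
      rw [ih]
      have hcount : 1 ≤ List.count c l2 := List.one_le_count_iff.mpr hc
      constructor
      · intro h d
        have hd := h d
        rw [List.count_erase] at hd
        rw [List.count_cons]
        by_cases hdc : c = d
        · subst hdc; simp at hd ⊢; omega
        · simp [hdc] at hd ⊢; omega
      · intro h d
        have hd := h d
        rw [List.count_erase]
        rw [List.count_cons] at hd
        by_cases hdc : c = d
        · subst hdc; simp at hd ⊢; omega
        · simp [hdc] at hd ⊢; omega
    · rw [show subAnagramLoop (c :: rest) l2 = false by
        simp [subAnagramLoop, (PySem.List.remove?_eq_none_iff l2 c).mpr hc]]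
      refine iff_of_false (by simp) ?_
      intro h
      have := h c
      rw [List.count_cons, List.count_eq_zero_of_not_mem hc] at this
      simp at this

-- B's table comparison succeeds iff the same multiset containment holds
theorem sub_anagram_alt_iff (str1 str2 : String) :
    sub_anagram_alt str1 str2 = true ↔ ∀ c, str1.toList.count c ≤ str2.toList.count c := by
  unfold sub_anagram_alt
  simp only [PySem.Dict.foldl_insert_getD_add_one_eq_counter, PySem.Dict.items_counter,
    List.all_map, List.all_eq_true, Function.comp, PySem.Dict.getD_counter, decide_eq_true_eq]
  constructor
  · intro h c
    by_cases hm : c ∈ str1.toList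
    · have := h c ((PySem.Set.mem_ofList _ _).mpr hm)
      exact_mod_cast this
    · simp [List.count_eq_zero_of_not_mem hm]
  · intro h c _
    exact_mod_cast h c

-- ===== VERDICT (by name: the statement is the Claim_ definition above) =====
theorem sub_anagram_spec : Claim_equal_sub_anagram := by
  intro str1 str2 _
  unfold Spec_sub_anagram sub_anagram
  rw [Bool.eq_iff_iff, subAnagramLoop_iff, sub_anagram_alt_iff]
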